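-- pv_equiv track=rewrite | github.com/HatimMuqbel/Decisiongraph-core-v1.3 | decisiongraph-complete/debug_similarity.py | _select_schema_id_for_codes
-- ===== SOURCE A (Python) =====
-- def _select_schema_id_for_codes(codes):
--     prefixes = {code.split("-")[1] for code in codes if code.startswith("RC-") and "-" in code}
--     if "RPT" in prefixes:
--         return "decisiongraph:aml:report:v1"
--     if "SCR" in prefixes:
--         return "decisiongraph:aml:screening:v1"
--     if "KYC" in prefixes:
--         return "decisiongraph:aml:kyc:v1"
--     if "MON" in prefixes:
--         return "decisiongraph:aml:monitoring:v1"
--     return "decisiongraph:aml:txn:v1"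
-- ===== SOURCE B (Python) =====
-- def _select_schema_id_for_codes(codes):
--     for prefix, schema_id in (
--         ("RPT", "decisiongraph:aml:report:v1"),
--         ("SCR", "decisiongraph:aml:screening:v1"),
--         ("KYC", "decisiongraph:aml:kyc:v1"),
--         ("MON", "decisiongraph:aml:monitoring:v1"),
--     ):
--         if any(c.startswith("RC-") and c.split("-")[1] == prefix for c in codes):
--             return schema_id
--     return "decisiongraph:aml:txn:v1"
-- ===== Notes on version B (the rewrite author's own statement) =====
-- stated objective: simpler
-- what changed: B drops A's intermediate set of extracted prefixes and instead scans the codes directly once per priority prefix (RPT, SCR, KYC, MON), returning on the first hit.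
import Mathlib
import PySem

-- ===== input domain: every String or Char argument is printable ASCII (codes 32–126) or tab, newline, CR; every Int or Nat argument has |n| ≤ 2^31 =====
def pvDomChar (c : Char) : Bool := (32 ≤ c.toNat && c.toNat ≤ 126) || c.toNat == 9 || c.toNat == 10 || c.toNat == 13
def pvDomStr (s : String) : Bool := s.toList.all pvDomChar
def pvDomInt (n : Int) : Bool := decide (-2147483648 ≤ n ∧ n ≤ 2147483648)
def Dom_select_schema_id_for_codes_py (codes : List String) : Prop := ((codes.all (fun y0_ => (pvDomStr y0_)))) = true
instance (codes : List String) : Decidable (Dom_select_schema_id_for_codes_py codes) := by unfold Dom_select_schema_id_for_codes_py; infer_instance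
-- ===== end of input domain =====

-- B replaces A's build-a-set-then-four-membership-tests with a direct scan of the codes per
-- priority prefix (simpler: no intermediate set is built).

-- ===== PORT A =====
-- code.split("-")[1]; under A's guard ("-" in code) the split has ≥ 2 pieces, so the
-- index is always in range and List.getD 1 is exact there.
def pvSecond (code : String) : String := ((PySem.Str.split? code "-").getD []).getD 1 ""

def select_schema_id_for_codes_py (codes : List String) : String :=
  let prefixes : PySem.Set String :=
    PySem.Set.ofList
      ((codes.filter (fun code => PySem.Str.startswith code "RC-" && PySem.Str.isIn "-" code)).map
        pvSecond)
  if PySem.Set.contains prefixes "RPT" then "decisiongraph:aml:report:v1"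
  else if PySem.Set.contains prefixes "SCR" then "decisiongraph:aml:screening:v1"
  else if PySem.Set.contains prefixes "KYC" then "decisiongraph:aml:kyc:v1"
  else if PySem.Set.contains prefixes "MON" then "decisiongraph:aml:monitoring:v1"
  else "decisiongraph:aml:txn:v1"

-- ===== PORT B =====
def pvHit (codes : List String) (pfx : String) : Bool :=
  codes.any (fun c => PySem.Str.startswith c "RC-" && (pvSecond c == pfx))

def pvLoopB (codes : List String) : List (String × String) → String
  | [] => "decisiongraph:aml:txn:v1"
  | (pfx, sid) :: rest => if pvHit codes pfx then sid else pvLoopB codes rest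

def select_schema_id_for_codes_py_alt (codes : List String) : String :=
  pvLoopB codes
    [("RPT", "decisiongraph:aml:report:v1"),
     ("SCR", "decisiongraph:aml:screening:v1"),
     ("KYC", "decisiongraph:aml:kyc:v1"),
     ("MON", "decisiongraph:aml:monitoring:v1")]

-- ===== PRECONDITION & SPEC =====
def Spec_select_schema_id_for_codes_py (codes : List String) (out : String) : Prop := out = select_schema_id_for_codes_py_alt codes
instance (codes : List String) (out : String) : Decidable (Spec_select_schema_id_for_codes_py codes out) := by unfold Spec_select_schema_id_for_codes_py; infer_instance

-- ===== CLAIM (what is proved, stated in full; the proofs are below) =====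
def Claim_equal_select_schema_id_for_codes_py : Prop := ∀ (codes : List String), Dom_select_schema_id_for_codes_py codes → Spec_select_schema_id_for_codes_py codes (select_schema_id_for_codes_py codes)

-- ===== LEMMAS AND PROOFS =====

-- startswith "RC-" implies "-" in code, so A's second guard is redundant.
theorem pv_startswith_isIn (s : String) (h : PySem.Str.startswith s "RC-" = true) :
    PySem.Str.isIn "-" s = true := by
  rw [PySem.Str.startswith_eq] at h
  rw [PySem.Str.isIn_eq]
  rw [← PySem.Chars.exists_prefix_drop_iff_isIn]
  rw [PySem.Chars.startswith_iff] at h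
  refine ⟨2, ?_⟩
  obtain ⟨t, ht⟩ := h
  rw [← ht]
  simp [List.drop]

theorem pv_contains_eq_hit (codes : List String) (x : String) :
    PySem.Set.contains
      (PySem.Set.ofList
        ((codes.filter (fun code => PySem.Str.startswith code "RC-" && PySem.Str.isIn "-" code)).map
          pvSecond)) x = pvHit codes x := by
  rw [Bool.eq_iff_iff]
  constructor
  · intro h
    rw [PySem.Set.contains_iff, PySem.Set.mem_ofList] at h
    obtain ⟨c, hc, hfc⟩ := List.mem_map.mp h
    obtain ⟨hmem, hcond⟩ := List.mem_filter.mp hc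
    rw [pvHit, List.any_eq_true]
    exact ⟨c, hmem, by simp_all [Bool.and_eq_true]⟩
  · intro h
    rw [pvHit, List.any_eq_true] at h
    obtain ⟨c, hmem, hc⟩ := h
    rw [Bool.and_eq_true, beq_iff_eq] at hc
    rw [PySem.Set.contains_iff, PySem.Set.mem_ofList]
    refine List.mem_map.mpr ⟨c, List.mem_filter.mpr ⟨hmem, ?_⟩, hc.2⟩
    rw [Bool.and_eq_true]
    exact ⟨hc.1, pv_startswith_isIn c hc.1⟩

-- ===== VERDICT (by name: the statement is the Claim_ definition above) =====
theorem select_schema_id_for_codes_py_spec : Claim_equal_select_schema_id_for_codes_py := by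
  intro codes _
  unfold Spec_select_schema_id_for_codes_py select_schema_id_for_codes_py
    select_schema_id_for_codes_py_alt
  simp only [pv_contains_eq_hit, pvLoopB]
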